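-- pv_equiv track=rewrite | github.com/blakeohare/crayon | Libraries/Xml/native/lang-python/gen/lib_xml.py | lib_xml_ampUnescape
-- ===== SOURCE A (Python) =====
-- def lib_xml_ampUnescape(value, entityLookup):
--   ampParts = value.split("&")
--   i = 1
--   while (i < len(ampParts)):
--     component = ampParts[i]
--     semicolon = component.find(";")
--     if (semicolon != -1):
--       entityCode = component[0:0 + semicolon]
--       entityValue = lib_xml_getEntity(entityCode, entityLookup)
--       if (entityValue == None):
--         entityValue = "&"
--       else:
--         component = component[(semicolon + 1):(semicolon + 1) + ((len(component) - semicolon - 1))]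
--       ampParts[i] = entityValue + component
--     i += 1
--   return ("").join(ampParts)
--
-- def lib_xml_getEntity(code, entityLookup):
--   if (code in entityLookup):
--     return entityLookup[code]
--   return None
-- ===== SOURCE B (Python) =====
-- def lib_xml_ampUnescape(value, entityLookup):
--     out = []
--     i = 0
--     n = len(value)
--     while i < n:
--         c = value[i]
--         if c != '&':
--             out.append(c)
--             i += 1
--         else:
--             j = i + 1
--             while j < n and value[j] != ';' and value[j] != '&':
--                 j += 1
--             if j < n and value[j] == ';':
--                 code = value[i + 1:j]
--                 if code in entityLookup:
--                     out.append(entityLookup[code])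
--                     i = j + 1
--                 else:
--                     out.append('&')
--                     i += 1
--             else:
--                 i += 1
--     return "".join(out)
-- ===== Notes on version B (the rewrite author's own statement) =====
-- stated objective: alternative
-- what changed: A splits the string on '&' into a list and rewrites each piece in place via find/slice before joining; B never splits: it makes one forward character scan, collecting an entity code until ';', '&' or the end and emitting the looked-up value, the kept '&', or nothing accordingly.
import Mathlib
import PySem

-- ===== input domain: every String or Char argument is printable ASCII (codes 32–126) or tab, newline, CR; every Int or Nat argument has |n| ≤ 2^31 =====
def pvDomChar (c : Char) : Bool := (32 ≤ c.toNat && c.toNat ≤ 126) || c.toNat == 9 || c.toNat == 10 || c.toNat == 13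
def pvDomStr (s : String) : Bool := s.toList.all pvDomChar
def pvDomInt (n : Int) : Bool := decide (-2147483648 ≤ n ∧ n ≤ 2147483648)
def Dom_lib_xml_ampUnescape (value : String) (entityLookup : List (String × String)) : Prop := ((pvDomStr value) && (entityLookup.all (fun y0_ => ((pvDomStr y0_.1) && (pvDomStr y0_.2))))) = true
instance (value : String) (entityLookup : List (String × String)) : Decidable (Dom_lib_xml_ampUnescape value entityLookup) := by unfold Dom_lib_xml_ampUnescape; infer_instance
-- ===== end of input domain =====

-- B replaces A's split-into-list-then-rewrite-each-piece with a single forward character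
-- scan (different decomposition, same cost); both ports work on List Char, Strings convert at the boundary.

-- ===== PORT A =====
def lib_xml_getEntity (code : List Char) (entityLookup : List (List Char × List Char)) :
    Option (List Char) :=
  let d := PySem.Dict.mk entityLookup
  if d.contains code then d.get? code else none

def pvAmpLoopA (entityLookup : List (List Char × List Char)) (ampParts : List (List Char))
    (i : Nat) : List (List Char) :=
  if h : i < ampParts.length then
    let component := ampParts[i]
    let semicolon := PySem.Chars.find component [';']
    if semicolon ≠ -1 then
      let entityCode := PySem.List.slice component (some 0) (some (0 + semicolon))
      match lib_xml_getEntity entityCode entityLookup with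
      | none =>
          pvAmpLoopA entityLookup (ampParts.set i (['&'] ++ component)) (i + 1)
      | some entityValue =>
          let component' := PySem.List.slice component (some (semicolon + 1))
            (some ((semicolon + 1) + ((component.length : Int) - semicolon - 1)))
          pvAmpLoopA entityLookup (ampParts.set i (entityValue ++ component')) (i + 1)
    else
      pvAmpLoopA entityLookup ampParts (i + 1)
  else ampParts
termination_by ampParts.length - i
decreasing_by all_goals (try simp only [List.length_set]); omega

def lib_xml_ampUnescape (value : String) (entityLookup : List (String × String)) : String :=
  let el := entityLookup.map (fun p => (p.1.toList, p.2.toList))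
  let ampParts := PySem.Chars.splitOn value.toList ['&']
  String.ofList (PySem.Chars.join [] (pvAmpLoopA el ampParts 1))

-- ===== PORT B =====
-- inner while loop of Source B: collect chars until ';' or '&' or the end; returns (code, rest)
def pvScanCode : List Char → List Char × List Char
  | [] => ([], [])
  | c :: t =>
      if c = ';' ∨ c = '&' then ([], c :: t)
      else
        let p := pvScanCode t
        (c :: p.1, p.2)

theorem pvScanCode_snd_len (t : List Char) : (pvScanCode t).2.length ≤ t.length := by
  induction t with
  | nil => simp [pvScanCode]
  | cons c t ih =>
      simp only [pvScanCode]
      split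
      · simp
      · simpa using Nat.le_succ_of_le ih

def pvGoB (entityLookup : List (List Char × List Char)) : List Char → List Char
  | [] => []
  | c :: t =>
      if c ≠ '&' then c :: pvGoB entityLookup t
      else
        match hs : (pvScanCode t).2 with
        | ';' :: after =>
            let code := (pvScanCode t).1
            let d := PySem.Dict.mk entityLookup
            if d.contains code then d.getD code [] ++ pvGoB entityLookup after
            else '&' :: pvGoB entityLookup t
        | _ => pvGoB entityLookup t
termination_by cs => cs.length
decreasing_by
  · simp
  · have := pvScanCode_snd_len t
    rw [hs] at this
    simp at this ⊢
    omega
  · simp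
  · simp

def lib_xml_ampUnescape_alt (value : String) (entityLookup : List (String × String)) : String :=
  let el := entityLookup.map (fun p => (p.1.toList, p.2.toList))
  String.ofList (pvGoB el value.toList)

-- ===== PRECONDITION & SPEC =====
def Spec_lib_xml_ampUnescape (value : String) (entityLookup : List (String × String)) (out : String) : Prop := out = lib_xml_ampUnescape_alt value entityLookup
instance (value : String) (entityLookup : List (String × String)) (out : String) : Decidable (Spec_lib_xml_ampUnescape value entityLookup out) := by unfold Spec_lib_xml_ampUnescape; infer_instance

-- ===== CLAIM (what is proved, stated in full; the proofs are below) =====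
def Claim_equal_lib_xml_ampUnescape : Prop := ∀ (value : String) (entityLookup : List (String × String)), Dom_lib_xml_ampUnescape value entityLookup → Spec_lib_xml_ampUnescape value entityLookup (lib_xml_ampUnescape value entityLookup)

-- ===== LEMMAS AND PROOFS =====

-- the per-component rewrite A's loop applies to every piece after the first
def pvTransf (entityLookup : List (List Char × List Char)) (component : List Char) : List Char :=
  let semicolon := PySem.Chars.find component [';']
  if semicolon ≠ -1 then
    let entityCode := PySem.List.slice component (some 0) (some (0 + semicolon))
    match lib_xml_getEntity entityCode entityLookup with
    | none => ['&'] ++ component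
    | some entityValue =>
        entityValue ++ PySem.List.slice component (some (semicolon + 1))
          (some ((semicolon + 1) + ((component.length : Int) - semicolon - 1)))
  else component

-- reference split on '&'
def pvSplitAmp : List Char → List (List Char)
  | [] => [[]]
  | c :: t =>
      if c = '&' then [] :: pvSplitAmp t
      else
        match pvSplitAmp t with
        | [] => [[c]]
        | h :: t' => (c :: h) :: t'

def pvPre (p : List Char) : List (List Char) → List (List Char)
  | [] => [p]
  | h :: t => (p ++ h) :: t

-- sum of A's loop result (head kept, tail rewritten), flattened
def pvF (entityLookup : List (List Char × List Char)) : List (List Char) → List Char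
  | [] => []
  | h :: t => h ++ (t.map (pvTransf entityLookup)).flatten

theorem pvSplitAmp_ne_nil (l : List Char) : pvSplitAmp l ≠ [] := by
  cases l with
  | nil => simp [pvSplitAmp]
  | cons c t =>
      simp only [pvSplitAmp]
      split
      · simp
      · split <;> simp

theorem pvPre_pvPre (p q : List Char) (s : List (List Char)) :
    pvPre p (pvPre q s) = pvPre (p ++ q) s := by
  cases s <;> simp [pvPre]

theorem pvPre_nil (s : List (List Char)) (h : s ≠ []) : pvPre [] s = s := by
  cases s with
  | nil => exact absurd rfl h
  | cons a b => simp [pvPre]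

theorem pvSplitAmp_cons_ne (c : Char) (t : List Char) (h : c ≠ '&') :
    pvSplitAmp (c :: t) = pvPre [c] (pvSplitAmp t) := by
  simp only [pvSplitAmp, if_neg h]
  cases hs : pvSplitAmp t <;> simp [pvPre]

theorem pvSplitAmp_cons_amp (t : List Char) : pvSplitAmp ('&' :: t) = [] :: pvSplitAmp t := by
  simp [pvSplitAmp]

theorem pvSplitAmp_append (code u : List Char) (h : ∀ x ∈ code, x ≠ '&') :
    pvSplitAmp (code ++ u) = pvPre code (pvSplitAmp u) := by
  induction code with
  | nil => simp [pvPre_nil _ (pvSplitAmp_ne_nil u)]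
  | cons c cs ih =>
      have hc : c ≠ '&' := h c (by simp)
      have ih' := ih (fun x hx => h x (by simp [hx]))
      simp only [List.cons_append, pvSplitAmp_cons_ne c _ hc, ih', pvPre_pvPre]
      simp

theorem pvSplitAmp_no_amp (l : List Char) (h : '&' ∉ l) : pvSplitAmp l = [l] := by
  induction l with
  | nil => simp [pvSplitAmp]
  | cons c t ih =>
      have hc : c ≠ '&' := fun hcc => h (by simp [hcc])
      have ih' := ih (fun hm => h (by simp [hm]))
      rw [pvSplitAmp_cons_ne c t hc, ih']
      simp [pvPre]

theorem pv_splitOn_go (fuel : Nat) :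
    ∀ (l cur : List Char) (acc : List (List Char)), l.length < fuel →
      PySem.Chars.splitOn.go ['&'] fuel l cur acc =
        acc.reverse ++ pvPre cur.reverse (pvSplitAmp l) := by
  induction fuel with
  | zero => intro l cur acc h; omega
  | succ n ih =>
      intro l cur acc h
      cases l with
      | nil =>
          simp [PySem.Chars.splitOn.go, pvSplitAmp, pvPre]
      | cons c rest =>
          rw [PySem.Chars.splitOn.go]
          by_cases hc : c = '&'
          · subst hc
            have hpre : List.isPrefixOf ['&'] ('&' :: rest) = true := by
              simp [List.isPrefixOf]
            rw [if_pos hpre]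
            have : List.drop (List.length ['&']) ('&' :: rest) = rest := by simp
            rw [this, ih rest [] (List.reverse cur :: acc) (by simpa using Nat.lt_of_succ_lt_succ h)]
            rw [List.reverse_nil, pvPre_nil _ (pvSplitAmp_ne_nil rest), pvSplitAmp_cons_amp]
            simp [pvPre]
          · have hpre : List.isPrefixOf ['&'] (c :: rest) = false := by
              simp [List.isPrefixOf]
              intro hcc; exact hc hcc.symm
            rw [if_neg (by simp [hpre])]
            rw [ih rest (c :: cur) acc (by simpa using Nat.lt_of_succ_lt_succ h)]
            rw [pvSplitAmp_cons_ne c rest hc, pvPre_pvPre]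
            simp

theorem pv_splitOn_eq (l : List Char) : PySem.Chars.splitOn l ['&'] = pvSplitAmp l := by
  rw [PySem.Chars.splitOn, pv_splitOn_go (l.length + 1) l [] [] (by omega)]
  simp [pvPre_nil _ (pvSplitAmp_ne_nil l)]

-- find on a single-character needle
theorem pv_find_go_not_mem (l : List Char) (k : Nat) (h : ';' ∉ l) :
    PySem.Chars.find.go [';'] l k = -1 := by
  induction l generalizing k with
  | nil => rfl
  | cons c t ih =>
      have hc : c ≠ ';' := fun hcc => h (by simp [hcc])
      have hpre : List.isPrefixOf [';'] (c :: t) = false := by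
        simp [List.isPrefixOf]
        intro hcc; exact hc hcc.symm
      have hstep : PySem.Chars.find.go [';'] (c :: t) k =
          if List.isPrefixOf [';'] (c :: t) = true then ((k : Nat) : Int)
          else PySem.Chars.find.go [';'] t (k + 1) := rfl
      rw [hstep, if_neg (by rw [hpre]; simp)]
      exact ih (k + 1) (fun hm => h (by simp [hm]))

theorem pv_find_go_mem (xs ys : List Char) (k : Nat) (h : ';' ∉ xs) :
    PySem.Chars.find.go [';'] (xs ++ ';' :: ys) k = (k : Int) + xs.length := by
  induction xs generalizing k with
  | nil =>
      have hstep : PySem.Chars.find.go [';'] ([] ++ ';' :: ys) k =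
          if List.isPrefixOf [';'] (';' :: ys) = true then ((k : Nat) : Int)
          else PySem.Chars.find.go [';'] ys (k + 1) := rfl
      rw [hstep]
      simp [List.isPrefixOf]
  | cons c t ih =>
      have hc : c ≠ ';' := fun hcc => h (by simp [hcc])
      have hpre : List.isPrefixOf [';'] ((c :: t) ++ ';' :: ys) = false := by
        simp [List.isPrefixOf]
        intro hcc; exact hc hcc.symm
      have hstep : PySem.Chars.find.go [';'] ((c :: t) ++ ';' :: ys) k =
          if List.isPrefixOf [';'] ((c :: t) ++ ';' :: ys) = true then ((k : Nat) : Int)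
          else PySem.Chars.find.go [';'] (t ++ ';' :: ys) (k + 1) := rfl
      rw [hstep, if_neg (by rw [hpre]; simp)]
      have := ih (k + 1) (fun hm => h (by simp [hm]))
      rw [this]
      simp only [List.length_cons]
      omega

theorem pv_find_semi_none (l : List Char) (h : ';' ∉ l) : PySem.Chars.find l [';'] = -1 := by
  rw [PySem.Chars.find]; exact pv_find_go_not_mem l 0 h

theorem pv_find_semi_some (xs ys : List Char) (h : ';' ∉ xs) :
    PySem.Chars.find (xs ++ ';' :: ys) [';'] = (xs.length : Int) := by
  rw [PySem.Chars.find, pv_find_go_mem xs ys 0 h]; simp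

-- pvTransf on the two component shapes
theorem pvTransf_no_semi (el : List (List Char × List Char)) (comp : List Char)
    (h : ';' ∉ comp) : pvTransf el comp = comp := by
  simp [pvTransf, pv_find_semi_none comp h]

theorem pvTransf_semi (el : List (List Char × List Char)) (code rest : List Char)
    (h : ';' ∉ code) :
    pvTransf el (code ++ ';' :: rest) =
      match lib_xml_getEntity code el with
      | none => '&' :: (code ++ ';' :: rest)
      | some v => v ++ rest := by
  have hfind := pv_find_semi_some code rest h
  have hlen : (code ++ ';' :: rest).length = code.length + 1 + rest.length := by
    simp; omega
  simp only [pvTransf, hfind]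
  rw [if_pos (by omega)]
  have hslice0 : PySem.List.slice (code ++ ';' :: rest) (some 0) (some (0 + (code.length : Int)))
      = code := by
      rw [zero_add, PySem.List.slice_zero_start, PySem.List.slice_to_natCast]
      simp
  have hslice1 : PySem.List.slice (code ++ ';' :: rest) (some ((code.length : Int) + 1))
        (some (((code.length : Int) + 1) + (((code ++ ';' :: rest).length : Int) - code.length - 1)))
      = rest := by
      have h1 : ((code.length : Int) + 1) = ((code.length + 1 : Nat) : Int) := by push_cast; ring
      have h2 : (((code.length : Int) + 1) + (((code ++ ';' :: rest).length : Int) - code.length - 1))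
          = ((code.length + 1 + rest.length : Nat) : Int) := by
        rw [hlen]; push_cast; ring
      rw [h2, h1, PySem.List.slice_natCast]
      have hdrop : (code ++ ';' :: rest).drop (code.length + 1) = rest := by
        simp [List.drop_append]
      rw [hdrop]
      simp
  rw [hslice0, hslice1]
  cases lib_xml_getEntity code el <;> simp

-- A's loop rewrites the pieces from index i on, independently
theorem pvAmpLoopA_eq (el : List (List Char × List Char)) :
    ∀ (n : Nat) (parts : List (List Char)) (i : Nat), parts.length - i ≤ n →
      pvAmpLoopA el parts i = parts.take i ++ (parts.drop i).map (pvTransf el) := by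
  intro n
  induction n with
  | zero =>
      intro parts i h
      rw [pvAmpLoopA]
      rw [dif_neg (by omega)]
      have : parts.drop i = [] := List.drop_eq_nil_of_le (by omega)
      simp [this, List.take_of_length_le (by omega : parts.length ≤ i)]
  | succ n ih =>
      intro parts i h
      rw [pvAmpLoopA]
      by_cases hi : i < parts.length
      · rw [dif_pos hi]
        have hdrop : parts.drop i = parts[i] :: parts.drop (i + 1) :=
          List.drop_eq_getElem_cons hi
        have htake : parts.take (i + 1) = parts.take i ++ [parts[i]] :=
          List.take_succ_eq_append_getElem hi
        by_cases hsemi : PySem.Chars.find parts[i] [';'] ≠ -1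
        · rw [if_pos hsemi]
          have hset : ∀ v : List Char,
              pvAmpLoopA el (parts.set i v) (i + 1) =
                parts.take i ++ v :: (parts.drop (i + 1)).map (pvTransf el) := by
            intro v
            rw [ih (parts.set i v) (i + 1) (by simp only [List.length_set]; omega)]
            rw [List.set_eq_take_append_cons_drop, if_pos hi]
            have hl : (parts.take i).length = i := by simp; omega
            have hmin : min (i + 1) i = i := by omega
            have htk : (parts.take i ++ v :: parts.drop (i + 1)).take (i + 1) =
                parts.take i ++ [v] := by
              rw [List.take_append, hl, List.take_take, hmin]
              simp
            have hdr : (parts.take i ++ v :: parts.drop (i + 1)).drop (i + 1) =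
                parts.drop (i + 1) := by
              rw [List.drop_append, hl]
              simp
            rw [htk, hdr]
            simp
          have htr : pvTransf el parts[i] =
              match lib_xml_getEntity
                  (PySem.List.slice parts[i] (some 0) (some (0 + PySem.Chars.find parts[i] [';'])))
                  el with
              | none => ['&'] ++ parts[i]
              | some v => v ++ PySem.List.slice parts[i]
                  (some (PySem.Chars.find parts[i] [';'] + 1))
                  (some ((PySem.Chars.find parts[i] [';'] + 1) +
                    ((parts[i].length : Int) - PySem.Chars.find parts[i] [';'] - 1))) := by
            simp only [pvTransf]
            rw [if_pos hsemi]
          cases hg : lib_xml_getEntity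
              (PySem.List.slice parts[i] (some 0) (some (0 + PySem.Chars.find parts[i] [';'])))
              el with
          | none =>
              rw [hset, hdrop]
              simp only [List.map_cons, htr, hg]
          | some v =>
              have htr2 : pvTransf el parts[i] = v ++ PySem.List.slice parts[i]
                  (some (PySem.Chars.find parts[i] [';'] + 1))
                  (some ((PySem.Chars.find parts[i] [';'] + 1) +
                    ((parts[i].length : Int) - PySem.Chars.find parts[i] [';'] - 1))) := by
                rw [htr, hg]
              simp only [hg]
              rw [hset, hdrop, List.map_cons, htr2]
        · rw [if_neg hsemi]
          have htr0 : pvTransf el parts[i] = parts[i] := by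
            simp only [pvTransf]
            rw [if_neg hsemi]
          rw [ih parts (i + 1) (by omega), hdrop, List.map_cons, htr0, htake]
          simp only [List.append_assoc, List.singleton_append]
      · rw [dif_neg hi]
        have : parts.drop i = [] := List.drop_eq_nil_of_le (by omega)
        simp [this, List.take_of_length_le (by omega : parts.length ≤ i)]

theorem pvScanCode_spec (t : List Char) :
    t = (pvScanCode t).1 ++ (pvScanCode t).2 ∧
    (∀ x ∈ (pvScanCode t).1, x ≠ ';' ∧ x ≠ '&') ∧
    (∀ c rest, (pvScanCode t).2 = c :: rest → c = ';' ∨ c = '&') := by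
  induction t with
  | nil => simp [pvScanCode]
  | cons c t ih =>
      simp only [pvScanCode]
      by_cases hc : c = ';' ∨ c = '&'
      · rw [if_pos hc]
        refine ⟨by simp, by simp, ?_⟩
        intro c' rest h
        simp at h
        exact h.1 ▸ hc
      · rw [if_neg hc]
        push_neg at hc
        refine ⟨?_, ?_, ih.2.2⟩
        · simpa using congrArg (c :: ·) ih.1
        · intro x hx
          simp at hx
          rcases hx with h | h
          · exact h ▸ hc
          · exact ih.2.1 x h

-- lookup bridge between A's helper and B's inline contains/getD
theorem pv_getEntity_contains_true (code : List Char) (el : List (List Char × List Char))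
    (h : (PySem.Dict.mk el).contains code = true) :
    lib_xml_getEntity code el = some ((PySem.Dict.mk el).getD code []) := by
  simp only [lib_xml_getEntity, h, if_true]
  have := PySem.Dict.contains_eq_isSome_get? (PySem.Dict.mk el) code
  rw [h] at this
  cases hg : (PySem.Dict.mk el).get? code with
  | none => rw [hg] at this; simp at this
  | some v => rw [PySem.Dict.getD_eq_get?_getD, hg]; rfl

theorem pv_getEntity_contains_false (code : List Char) (el : List (List Char × List Char))
    (h : (PySem.Dict.mk el).contains code = false) :
    lib_xml_getEntity code el = none := by
  simp [lib_xml_getEntity, h]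

-- B's scan computes A's head-plus-rewritten-tail, by strong induction on the length
theorem pvGoB_eq (el : List (List Char × List Char)) :
    ∀ (n : Nat) (cs : List Char), cs.length ≤ n → pvGoB el cs = pvF el (pvSplitAmp cs) := by
  intro n
  induction n with
  | zero =>
      intro cs h
      have : cs = [] := List.eq_nil_of_length_eq_zero (by omega)
      subst this
      simp [pvGoB, pvSplitAmp, pvF]
  | succ n ih =>
      intro cs hlen
      cases cs with
      | nil => simp [pvGoB, pvSplitAmp, pvF]
      | cons c t =>
          by_cases hc : c = '&'
          · subst hc
            rw [pvGoB]
            simp only [ne_eq, not_true_eq_false, if_false]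
            obtain ⟨hsplit, hcode, hstop⟩ := pvScanCode_spec t
            have hcodeAmp : ∀ x ∈ (pvScanCode t).1, x ≠ '&' := fun x hx => (hcode x hx).2
            have hcodeSemi : ';' ∉ (pvScanCode t).1 := fun hm => (hcode ';' hm).1 rfl
            have htlen : t.length ≤ n := by simpa using Nat.le_of_succ_le_succ hlen
            rw [pvSplitAmp_cons_amp]
            split
            · -- segment has a ';': look the code up
              rename_i after hs
              have ht : t = (pvScanCode t).1 ++ ';' :: after := by
                conv_lhs => rw [hsplit, hs]
              have hsa : pvSplitAmp t =
                  pvPre ((pvScanCode t).1 ++ [';']) (pvSplitAmp after) := by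
                conv_lhs => rw [ht]
                rw [pvSplitAmp_append _ _ hcodeAmp,
                  pvSplitAmp_cons_ne ';' after (by decide), pvPre_pvPre]
              cases hsp : pvSplitAmp after with
              | nil => exact absurd hsp (pvSplitAmp_ne_nil after)
              | cons ha ta =>
                  have hsa' : pvSplitAmp t = ((pvScanCode t).1 ++ ';' :: ha) :: ta := by
                    rw [hsa, hsp]; simp [pvPre]
                  have htr : pvTransf el ((pvScanCode t).1 ++ ';' :: ha) =
                      match lib_xml_getEntity (pvScanCode t).1 el with
                      | none => '&' :: ((pvScanCode t).1 ++ ';' :: ha)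
                      | some v => v ++ ha := pvTransf_semi el _ ha hcodeSemi
                  by_cases hcontains : (PySem.Dict.mk el).contains (pvScanCode t).1 = true
                  · rw [if_pos hcontains]
                    have hafter : after.length ≤ n := by
                      have := pvScanCode_snd_len t
                      rw [hs] at this
                      simp at this hlen
                      omega
                    rw [ih after hafter, hsp]
                    rw [hsa']
                    simp only [pvF, List.map_cons, List.flatten_cons, htr,
                      pv_getEntity_contains_true _ _ hcontains]
                    simp
                  · rw [if_neg hcontains]
                    have hcf : (PySem.Dict.mk el).contains (pvScanCode t).1 = false := by
                      rwa [Bool.not_eq_true] at hcontains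
                    rw [ih t htlen, hsa']
                    simp only [pvF, List.map_cons, List.flatten_cons, htr,
                      pv_getEntity_contains_false _ _ hcf]
                    simp
            · -- the stop is the end of the string or another '&': the '&' is dropped
              rename_i hne
              cases hs : (pvScanCode t).2 with
              | nil =>
                  have ht : t = (pvScanCode t).1 := by
                    conv_lhs => rw [hsplit, hs]
                    simp
                  have hamp : '&' ∉ t := fun hm => (hcodeAmp '&' (ht ▸ hm)) rfl
                  have hsem : ';' ∉ t := fun hm => hcodeSemi (ht ▸ hm)
                  rw [ih t htlen, pvSplitAmp_no_amp t hamp]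
                  simp [pvF, pvTransf_no_semi el t hsem]
              | cons stop after =>
                  have hstop' : stop = '&' := by
                    rcases hstop stop after hs with h1 | h1
                    · exact absurd (h1 ▸ hs) (fun hcontr => hne after hcontr)
                    · exact h1
                  subst hstop'
                  have ht : t = (pvScanCode t).1 ++ '&' :: after := by
                    conv_lhs => rw [hsplit, hs]
                  rw [ih t htlen]
                  have hsa : pvSplitAmp t = (pvScanCode t).1 :: pvSplitAmp after := by
                    conv_lhs => rw [ht]
                    rw [pvSplitAmp_append _ _ hcodeAmp, pvSplitAmp_cons_amp]
                    simp [pvPre]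
                  rw [hsa]
                  cases hsp : pvSplitAmp after with
                  | nil => exact absurd hsp (pvSplitAmp_ne_nil after)
                  | cons ha ta =>
                      simp [pvF, pvTransf_no_semi el _ hcodeSemi]
          · rw [pvGoB]
            rw [if_pos hc]
            have htlen : t.length ≤ n := by simpa using Nat.le_of_succ_le_succ hlen
            rw [ih t htlen, pvSplitAmp_cons_ne c t hc]
            cases hsp : pvSplitAmp t with
            | nil => exact absurd hsp (pvSplitAmp_ne_nil t)
            | cons h t' => simp [pvF, pvPre]

theorem pv_join_nil (ps : List (List Char)) : PySem.Chars.join [] ps = ps.flatten := by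
  rw [PySem.Chars.join]
  induction ps with
  | nil => simp [List.intercalate]
  | cons a l ih =>
      cases l with
      | nil => simp [List.intercalate]
      | cons b m =>
          simp only [List.intercalate, List.flatten] at ih ⊢
          cases m <;> simp_all [List.intersperse]

-- ===== VERDICT (by name: the statement is the Claim_ definition above) =====
theorem lib_xml_ampUnescape_spec : Claim_equal_lib_xml_ampUnescape := by
  intro value entityLookup _
  unfold Spec_lib_xml_ampUnescape
  change String.ofList (PySem.Chars.join []
      (pvAmpLoopA (entityLookup.map (fun p => (p.1.toList, p.2.toList)))
        (PySem.Chars.splitOn value.toList ['&']) 1)) =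
    String.ofList (pvGoB (entityLookup.map (fun p => (p.1.toList, p.2.toList))) value.toList)
  rw [pv_splitOn_eq, pvGoB_eq _ value.toList.length value.toList (le_refl _)]
  cases hsp : pvSplitAmp value.toList with
  | nil => exact absurd hsp (pvSplitAmp_ne_nil _)
  | cons h t =>
      rw [pvAmpLoopA_eq _ (h :: t).length (h :: t) 1 (by simp), pv_join_nil]
      simp [pvF]
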